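-- pv_equiv track=rewrite | github.com/PedroVidalRosas/Parcial-Tecnicas-Programacion | ejercicio2.py | pedro
-- ===== SOURCE A (Python) =====
-- def siguiente(mapaDelJuego,pocicion):
--     siguiente = []
--     for f in range(len(mapaDelJuego)):
--         fila = []
--         for c in range(len(mapaDelJuego[0])):
--             fila.append(disparo(mapaDelJuego,f,c,pocicion))
--         siguiente.append(fila)
--     return siguiente
--
-- def disparo(mapaDelJuego,f,c,pocicion):
--
--     for x in range(len(pocicion)):
--
--         fi=(pocicion[x][0])-1
--         co=(pocicion[x][1])-1
--         if f == fi and c == co: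
--             return '.'
--     return mapaDelJuego[f][c]
--
-- def pedro(mapa,posicionesDeDisparosDePrueba):
--     list = []
--     for x in range(1, len(mapa)):
--         if len(mapa[x - 1]) != len(mapa[x]):
--             return list
--     lista = []
--     lista = siguiente(mapa,posicionesDeDisparosDePrueba)
--     posicionesDeBarcosVivos= []
--     for f in range(len(lista)):
--         li = ()
--         for c in range(len(lista[0])):
--             if lista[f][c]=='b':
--                 li = (f+1,c+1)
--             if li!=[] and len(li)==2:
--                 posicionesDeBarcosVivos.append(li)
--                 li = []
--     return posicionesDeBarcosVivos
-- ===== SOURCE B (Python) =====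
-- def pedro(mapa, posicionesDeDisparosDePrueba):
--     if any(len(a) != len(b) for a, b in zip(mapa, mapa[1:])):
--         return []
--     barcos = {(f + 1, c + 1)
--               for f, fila in enumerate(mapa)
--               for c, v in enumerate(fila) if v == 'b'}
--     disparos = {(p[0], p[1]) for p in posicionesDeDisparosDePrueba}
--     return sorted(barcos - disparos)
-- ===== Notes on version B (the rewrite author's own statement) =====
-- stated objective: faster
-- what changed: Replaces the materialized transformed grid plus per-cell linear scan over the shot list with two set comprehensions and a set difference followed by a sort (row-major order is recovered because cell coordinates are distinct).
import Mathlib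
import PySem

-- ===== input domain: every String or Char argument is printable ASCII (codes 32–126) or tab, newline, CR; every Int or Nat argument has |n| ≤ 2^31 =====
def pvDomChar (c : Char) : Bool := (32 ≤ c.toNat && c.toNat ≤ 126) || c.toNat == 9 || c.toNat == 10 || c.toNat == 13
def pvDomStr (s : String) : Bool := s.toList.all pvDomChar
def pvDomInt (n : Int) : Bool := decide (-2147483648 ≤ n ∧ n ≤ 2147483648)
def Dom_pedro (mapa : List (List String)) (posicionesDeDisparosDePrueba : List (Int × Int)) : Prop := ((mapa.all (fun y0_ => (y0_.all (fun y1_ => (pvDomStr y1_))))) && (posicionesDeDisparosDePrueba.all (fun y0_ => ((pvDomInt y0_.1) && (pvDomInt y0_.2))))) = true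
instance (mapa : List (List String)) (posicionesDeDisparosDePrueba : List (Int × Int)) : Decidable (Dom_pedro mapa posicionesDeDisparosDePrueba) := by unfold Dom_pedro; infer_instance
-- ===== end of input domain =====

-- B replaces A's materialized transformed grid and per-cell linear scan over the shot list
-- by set comprehensions, a set difference and a sort (row-major order is recovered since
-- cell coordinates are distinct): a different algorithm with better asymptotics.

-- ===== PORT A =====
-- disparo(mapaDelJuego,f,c,pocicion): scan the shot list in order; the index loop over
-- range(len(pocicion)) reading pocicion[x] is transcribed as structural recursion over the list.
def pedroDisparo (mapa : List (List String)) (f c : Nat) : List (Int × Int) → String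
  | [] => (mapa.getD f []).getD c ""      -- mapa[f][c]; always in range at A's call sites
  | p :: rest =>
      if (f : Int) = p.1 - 1 ∧ (c : Int) = p.2 - 1 then "." else pedroDisparo mapa f c rest

-- siguiente(mapaDelJuego,pocicion): build the shot-applied grid row by row
def pedroSiguiente (mapa : List (List String)) (pocicion : List (Int × Int)) : List (List String) :=
  (List.range mapa.length).map (fun f =>
    (List.range (mapa.headD []).length).map (fun c => pedroDisparo mapa f c pocicion))

-- the guard loop 'for x in range(1,len(mapa)): if len(mapa[x-1]) != len(mapa[x]): return list'
def pedroGuard : List (List String) → Bool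
  | a :: b :: rest => if a.length ≠ b.length then false else pedroGuard (b :: rest)
  | _ => true

-- one row of the collection loop, with the li-state (li : Option, () / [] = none)
def pedroRow (lista : List (List String)) (f : Nat) (acc : List (Int × Int)) : List (Int × Int) :=
  ((List.range (lista.headD []).length).foldl
    (fun (st : Option (Int × Int) × List (Int × Int)) c =>
      let li := if ((lista.getD f []).getD c "") = "b" then some ((f : Int) + 1, (c : Int) + 1) else st.1
      match li with
      | some p => (none, st.2 ++ [p])
      | none => (none, st.2)) (none, acc)).2

def pedro (mapa : List (List String)) (posicionesDeDisparosDePrueba : List (Int × Int)) : List (Int × Int) :=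
  if pedroGuard mapa then
    let lista := pedroSiguiente mapa posicionesDeDisparosDePrueba
    (List.range lista.length).foldl (fun acc f => pedroRow lista f acc) []
  else []

-- ===== PORT B =====
def pedro_alt (mapa : List (List String)) (posicionesDeDisparosDePrueba : List (Int × Int)) : List (Int × Int) :=
  if (mapa.zip (mapa.drop 1)).any (fun ab => ab.1.length ≠ ab.2.length) then []
  else
    let barcos : PySem.Set (Int × Int) :=
      (PySem.List.enumerate mapa).foldl (fun s fr =>
        (PySem.List.enumerate fr.2).foldl (fun s2 cv =>
          if cv.2 = "b" then PySem.Set.add s2 (fr.1 + 1, cv.1 + 1) else s2) s) PySem.Set.empty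
    let disparos : PySem.Set (Int × Int) :=
      PySem.Set.ofList (posicionesDeDisparosDePrueba.map (fun p => (p.1, p.2)))
    PySem.List.sorted2 (PySem.Set.diff barcos disparos) Prod.fst Prod.snd

-- ===== PRECONDITION & SPEC =====
def Spec_pedro (mapa : List (List String)) (posicionesDeDisparosDePrueba : List (Int × Int)) (out : List (Int × Int)) : Prop := out = pedro_alt mapa posicionesDeDisparosDePrueba
instance (mapa : List (List String)) (posicionesDeDisparosDePrueba : List (Int × Int)) (out : List (Int × Int)) : Decidable (Spec_pedro mapa posicionesDeDisparosDePrueba out) := by unfold Spec_pedro; infer_instance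

-- ===== CLAIM (what is proved, stated in full; the proofs are below) =====
def Claim_equal_pedro : Prop := ∀ (mapa : List (List String)) (posicionesDeDisparosDePrueba : List (Int × Int)), Dom_pedro mapa posicionesDeDisparosDePrueba → Spec_pedro mapa posicionesDeDisparosDePrueba (pedro mapa posicionesDeDisparosDePrueba)

-- ===== LEMMAS AND PROOFS =====

-- the strict row-major (lexicographic) order on 1-indexed cell coordinates
def lexlt (a b : Int × Int) : Prop := a.1 < b.1 ∨ (a.1 = b.1 ∧ a.2 < b.2)

-- the common characterisation: row-major 1-indexed positions of unshot 'b' cells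
def bCells (mapa : List (List String)) (pos : List (Int × Int)) : List (Int × Int) :=
  (List.range mapa.length).flatMap (fun f =>
    (List.range (mapa.headD []).length).filterMap (fun c =>
      if ((mapa.getD f []).getD c "" = "b") ∧ (∀ p ∈ pos, ¬(p.1 = (f : Int) + 1 ∧ p.2 = (c : Int) + 1))
      then some ((f : Int) + 1, (c : Int) + 1) else none))

-- ---------- A side ----------

theorem disparo_eq (mapa : List (List String)) (f c : Nat) (pos : List (Int × Int)) :
    pedroDisparo mapa f c pos =
      if (∃ p ∈ pos, (f : Int) = p.1 - 1 ∧ (c : Int) = p.2 - 1) then "."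
      else (mapa.getD f []).getD c "" := by
  induction pos with
  | nil => simp [pedroDisparo]
  | cons p rest ih =>
      by_cases h : (f : Int) = p.1 - 1 ∧ (c : Int) = p.2 - 1
      · simp [pedroDisparo, h]
      · simp only [pedroDisparo, if_neg h, ih]
        congr 1
        simp only [List.mem_cons, eq_iff_iff]
        constructor
        · rintro ⟨q, hq, h2⟩; exact ⟨q, Or.inr hq, h2⟩
        · rintro ⟨q, hq | hq, h2⟩
          · exact absurd (hq ▸ h2) h
          · exact ⟨q, hq, h2⟩

theorem getD_map_range {α : Type} (n : Nat) (g : Nat → α) (f : Nat) (hf : f < n) (d : α) :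
    ((List.range n).map g).getD f d = g f := by
  rw [List.getD_eq_getElem?_getD, List.getElem?_map, List.getElem?_range hf]
  rfl

theorem siguiente_cell (mapa : List (List String)) (pos : List (Int × Int)) (f c : Nat)
    (hf : f < mapa.length) (hc : c < (mapa.headD []).length) :
    ((pedroSiguiente mapa pos).getD f []).getD c "" = pedroDisparo mapa f c pos := by
  unfold pedroSiguiente
  rw [getD_map_range _ _ _ hf, getD_map_range _ _ _ hc]

theorem siguiente_length (mapa : List (List String)) (pos : List (Int × Int)) :
    (pedroSiguiente mapa pos).length = mapa.length := by
  simp [pedroSiguiente]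

theorem siguiente_head_length (mapa : List (List String)) (pos : List (Int × Int))
    (h : mapa ≠ []) :
    ((pedroSiguiente mapa pos).headD []).length = (mapa.headD []).length := by
  cases mapa with
  | nil => exact absurd rfl h
  | cons r t => simp [pedroSiguiente, List.range_succ_eq_map]

theorem pedroRow_eq (lista : List (List String)) (f : Nat) :
    ∀ (n : Nat) (acc : List (Int × Int)),
      ((List.range n).foldl
        (fun (st : Option (Int × Int) × List (Int × Int)) c =>
          let li := if ((lista.getD f []).getD c "") = "b" then some ((f : Int) + 1, (c : Int) + 1) else st.1
          match li with
          | some p => (none, st.2 ++ [p])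
          | none => (none, st.2)) (none, acc))
      = (none, acc ++ (List.range n).filterMap
          (fun c => if ((lista.getD f []).getD c "") = "b" then some ((f : Int) + 1, (c : Int) + 1) else none)) := by
  intro n
  induction n with
  | zero => intro acc; simp
  | succ m ih =>
      intro acc
      rw [List.range_succ, List.foldl_append, List.filterMap_append, ih]
      by_cases h : ((lista.getD f []).getD m "") = "b"
      · simp only [List.foldl_cons, List.foldl_nil, List.filterMap_cons, List.filterMap_nil,
          if_pos h]
        simp [List.append_assoc]
      · simp only [List.foldl_cons, List.foldl_nil, List.filterMap_cons, List.filterMap_nil,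
          if_neg h]
        simp

theorem pedroRow_spec (lista : List (List String)) (f : Nat) (acc : List (Int × Int)) :
    pedroRow lista f acc = acc ++ (List.range (lista.headD []).length).filterMap
      (fun c => if ((lista.getD f []).getD c "") = "b" then some ((f : Int) + 1, (c : Int) + 1) else none) := by
  unfold pedroRow
  rw [pedroRow_eq]

theorem pedro_outer (lista : List (List String)) :
    ∀ (l : List Nat) (acc : List (Int × Int)),
      l.foldl (fun acc f => pedroRow lista f acc) acc
      = acc ++ l.flatMap (fun f => (List.range (lista.headD []).length).filterMap
          (fun c => if ((lista.getD f []).getD c "") = "b" then some ((f : Int) + 1, (c : Int) + 1) else none)) := by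
  intro l
  induction l with
  | nil => intro acc; simp
  | cons x t ih =>
      intro acc
      rw [List.foldl_cons, pedroRow_spec, ih, List.flatMap_cons, List.append_assoc]

theorem pedro_char (mapa : List (List String)) (pos : List (Int × Int))
    (hg : pedroGuard mapa = true) :
    pedro mapa pos = bCells mapa pos := by
  unfold pedro
  rw [if_pos hg, pedro_outer, List.nil_append, siguiente_length]
  unfold bCells
  refine List.flatMap_congr ?_
  intro f hf
  rw [List.mem_range] at hf
  have hne : mapa ≠ [] := by
    intro h; rw [h] at hf; simp at hf
  rw [siguiente_head_length mapa pos hne]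
  refine List.filterMap_congr ?_
  intro c hc
  rw [List.mem_range] at hc
  rw [siguiente_cell mapa pos f c hf hc, disparo_eq]
  by_cases hx : ∃ p ∈ pos, (f : Int) = p.1 - 1 ∧ (c : Int) = p.2 - 1
  · have h1 : ¬ (("." : String) = "b") := by decide
    have h2 : ¬ (((mapa.getD f []).getD c "" = "b") ∧
        ∀ p ∈ pos, ¬(p.1 = (f : Int) + 1 ∧ p.2 = (c : Int) + 1)) := by
      rintro ⟨-, hall⟩
      rcases hx with ⟨p, hp, hp1, hp2⟩
      exact hall p hp ⟨by omega, by omega⟩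
    rw [if_pos hx, if_neg h1, if_neg h2]
  · rw [if_neg hx]
    congr 1
    simp only [eq_iff_iff]
    constructor
    · intro hb
      refine ⟨hb, ?_⟩
      rintro p hp ⟨e1, e2⟩
      exact hx ⟨p, hp, by omega, by omega⟩
    · exact fun h => h.1

-- ---------- B side ----------

theorem guard_zip (mapa : List (List String)) :
    ((mapa.zip (mapa.drop 1)).any (fun ab => ab.1.length ≠ ab.2.length)) = !pedroGuard mapa := by
  induction mapa with
  | nil => simp [pedroGuard]
  | cons a t ih =>
      cases t with
      | nil => simp [pedroGuard]
      | cons b r =>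
          by_cases h : a.length = b.length
          · have ih' := ih
            simp only [List.drop_succ_cons, List.drop_zero, ne_eq, decide_not] at ih'
            simp [pedroGuard, h, ih']
          · simp [pedroGuard, h]

theorem guard_rect : ∀ (mapa : List (List String)), pedroGuard mapa = true →
    ∀ row ∈ mapa, row.length = (mapa.headD []).length
  | [] => by intro _ row h; simp at h
  | [a] => by
      intro _ row hr
      rcases List.mem_singleton.mp hr with rfl
      rfl
  | a :: b :: r => by
      intro hg row hr
      have h1 : a.length = b.length := by
        by_contra h
        simp [pedroGuard, h] at hg
      have hg' : pedroGuard (b :: r) = true := by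
        simpa [pedroGuard, h1] using hg
      rcases List.mem_cons.mp hr with rfl | hr'
      · rfl
      · have h2 : row.length = b.length := by
          simpa using guard_rect (b :: r) hg' row hr'
        show row.length = a.length
        rw [h1]
        exact h2

theorem enumerate_eq_range {α : Type} (d : α) :
    ∀ (xs : List α) (s : Int),
      PySem.List.enumerate xs s
        = (List.range xs.length).map (fun (i : Nat) => ((s + (i : Int), xs.getD i d) : Int × α)) := by
  intro xs
  induction xs with
  | nil => intro s; simp [PySem.List.enumerate]
  | cons x t ih =>
      intro s
      rw [show PySem.List.enumerate (x :: t) s = (s, x) :: PySem.List.enumerate t (s + 1) from rfl, ih]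
      rw [List.length_cons, List.range_succ_eq_map, List.map_cons, List.map_map]
      refine congrArg₂ List.cons (by simp) ?_
      refine List.map_congr_left (fun i _ => ?_)
      simp only [Function.comp_apply, Nat.succ_eq_add_one, List.getD_cons_succ]
      congr 1
      push_cast
      ring

theorem foldl_add_if {β : Type} (P : β → Prop) [DecidablePred P] (g : β → Int × Int) :
    ∀ (l : List β) (s : PySem.Set (Int × Int)),
      l.foldl (fun s2 cv => if P cv then PySem.Set.add s2 (g cv) else s2) s
      = (l.filterMap (fun cv => if P cv then some (g cv) else none)).foldl PySem.Set.add s := by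
  intro l
  induction l with
  | nil => intro s; simp
  | cons x t ih =>
      intro s
      by_cases h : P x <;> simp [h, ih]

theorem lexlt_irrefl (a : Int × Int) : ¬ lexlt a a := by
  simp [lexlt]

theorem foldl_add_pairwise :
    ∀ (xs s : List (Int × Int)), (s ++ xs).Pairwise lexlt →
      xs.foldl PySem.Set.add s = s ++ xs := by
  intro xs
  induction xs with
  | nil => intro s _; simp
  | cons x t ih =>
      intro s hp
      have hcross : ∀ a ∈ s, lexlt a x := by
        intro a ha
        exact ((List.pairwise_append.mp hp).2.2) a ha x (List.mem_cons_self)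
      have hx' : x ∉ s := fun hin => lexlt_irrefl x (hcross x hin)
      have hadd : PySem.Set.add s x = s ++ [x] := by
        simp [PySem.Set.add, PySem.Set.contains, hx']
      rw [List.foldl_cons, hadd, ih (s ++ [x]) (by simpa [List.append_assoc] using hp)]
      simp

theorem pairwise_flatMap' {α β : Type} (R : β → β → Prop) (g : α → List β) (l : List α)
    (h1 : l.Pairwise (fun a b => ∀ x ∈ g a, ∀ y ∈ g b, R x y))
    (h2 : ∀ a ∈ l, (g a).Pairwise R) :
    (l.flatMap g).Pairwise R := by
  induction l with
  | nil => simp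
  | cons a t ih =>
      rw [List.flatMap_cons, List.pairwise_append]
      refine ⟨h2 a List.mem_cons_self, ih (List.Pairwise.sublist (List.sublist_cons_self a t) h1)
        (fun b hb => h2 b (List.mem_cons_of_mem a hb)), ?_⟩
      intro x hx y hy
      rw [List.mem_flatMap] at hy
      rcases hy with ⟨b, hb, hyb⟩
      exact (List.pairwise_cons.mp h1).1 b hb x hx y hyb

-- the list of additions performed by B's set comprehension, in row-major order
theorem barcos_pairwise (mapa : List (List String)) :
    ((List.range mapa.length).flatMap (fun f =>
      (List.range ((mapa.getD f []).length)).filterMap (fun c =>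
        if (mapa.getD f []).getD c "" = "b" then some ((f : Int) + 1, (c : Int) + 1) else none))).Pairwise lexlt := by
  apply pairwise_flatMap'
  · refine List.Pairwise.imp ?_ (List.pairwise_lt_range)
    intro f f' hff x hx y hy
    rw [List.mem_filterMap] at hx hy
    rcases hx with ⟨c, -, hc⟩
    rcases hy with ⟨c', -, hc'⟩
    split at hc <;> cases hc
    split at hc' <;> cases hc'
    left; simp; omega
  · intro f _
    rw [List.pairwise_filterMap]
    refine List.Pairwise.imp ?_ (List.pairwise_lt_range)
    intro c c' hcc x hx y hy
    split at hx <;> cases hx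
    split at hy <;> cases hy
    right
    constructor
    · rfl
    · simp; omega

theorem filter_filterMap_if {β : Type} (P : β → Prop) [DecidablePred P] (g : β → Int × Int)
    (q : Int × Int → Bool) :
    ∀ (l : List β),
      (l.filterMap (fun c => if P c then some (g c) else none)).filter q
      = l.filterMap (fun c => if P c ∧ q (g c) = true then some (g c) else none) := by
  intro l
  induction l with
  | nil => simp
  | cons x t ih =>
      by_cases h : P x
      · by_cases hq : q (g x) = true <;> simp [h, hq, ih]
      · simp [h, ih]

theorem sorted2_before_false (a b : Int × Int) (h : lexlt a b) :
    (decide (b.1 < a.1) || (!decide (a.1 < b.1) && decide (b.2 < a.2))) = false := by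
  rcases h with h | ⟨h1, h2⟩
  · simp only [Bool.or_eq_false_iff, Bool.and_eq_false_iff, decide_eq_false_iff_not, not_lt,
      Bool.not_eq_false', decide_eq_true_eq]
    exact ⟨by omega, Or.inl h⟩
  · simp only [Bool.or_eq_false_iff, Bool.and_eq_false_iff, decide_eq_false_iff_not, not_lt,
      Bool.not_eq_false', decide_eq_true_eq]
    exact ⟨by omega, Or.inr (by omega)⟩

theorem foldl_insertBy_append (before : Int × Int → Int × Int → Bool) :
    ∀ (xs acc : List (Int × Int)),
      xs.Pairwise (fun a b => before b a = false) →
      (∀ x ∈ xs, ∀ y ∈ acc, before x y = false) →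
      xs.foldl (fun acc x => PySem.List.insertBy before x acc) acc = acc ++ xs := by
  intro xs
  induction xs with
  | nil => intro acc _ _; simp
  | cons x t ih =>
      intro acc hp hc
      rw [List.foldl_cons,
        PySem.List.insertBy_of_forall_not_before before x acc (hc x List.mem_cons_self),
        ih (acc ++ [x]) (List.Pairwise.sublist (List.sublist_cons_self x t) hp) ?_]
      · simp
      · intro z hz y hy
        rw [List.mem_append] at hy
        rcases hy with hy | hy
        · exact hc z (List.mem_cons_of_mem x hz) y hy
        · rcases List.mem_singleton.mp hy with rfl
          exact (List.pairwise_cons.mp hp).1 z hz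

theorem sorted2_eq_self (xs : List (Int × Int)) (h : xs.Pairwise lexlt) :
    PySem.List.sorted2 xs Prod.fst Prod.snd false = xs := by
  unfold PySem.List.sorted2
  simp only [if_neg (by decide : ¬ (false = true))]
  rw [foldl_insertBy_append _ xs []
    (List.Pairwise.imp (fun {a b} hab => sorted2_before_false a b hab) h)
    (by intro x _ y hy; simp at hy)]
  simp

theorem inner_eq (fr : Int × List String) (s : PySem.Set (Int × Int)) :
    (PySem.List.enumerate fr.2).foldl
      (fun s2 cv => if cv.2 = "b" then PySem.Set.add s2 (fr.1 + 1, cv.1 + 1) else s2) s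
    = ((PySem.List.enumerate fr.2).filterMap
        (fun cv => if cv.2 = "b" then some (fr.1 + 1, cv.1 + 1) else none)).foldl PySem.Set.add s :=
  foldl_add_if (fun (cv : Int × String) => cv.2 = "b") (fun (cv : Int × String) => (fr.1 + 1, cv.1 + 1)) _ s

theorem pedro_alt_char (mapa : List (List String)) (pos : List (Int × Int))
    (hg : pedroGuard mapa = true) :
    pedro_alt mapa pos = bCells mapa pos := by
  have hcond : ¬ (((mapa.zip (mapa.drop 1)).any (fun ab => ab.1.length ≠ ab.2.length)) = true) := by
    rw [guard_zip, hg]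
    simp
  have h1 : pedro_alt mapa pos = PySem.List.sorted2 (PySem.Set.diff
      ((PySem.List.enumerate mapa).foldl (fun s fr =>
        (PySem.List.enumerate fr.2).foldl (fun s2 cv =>
          if cv.2 = "b" then PySem.Set.add s2 (fr.1 + 1, cv.1 + 1) else s2) s) PySem.Set.empty)
      (PySem.Set.ofList (pos.map (fun p => (p.1, p.2))))) Prod.fst Prod.snd := by
    unfold pedro_alt
    rw [if_neg hcond]
  -- the list of additions, converted from enumerate form to range form
  have hAL : (PySem.List.enumerate mapa).flatMap (fun fr =>
      (PySem.List.enumerate fr.2).filterMap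
        (fun cv => if cv.2 = "b" then some (fr.1 + 1, cv.1 + 1) else none))
      = (List.range mapa.length).flatMap (fun f =>
          (List.range ((mapa.getD f []).length)).filterMap (fun c =>
            if (mapa.getD f []).getD c "" = "b" then some ((f : Int) + 1, (c : Int) + 1) else none)) := by
    rw [enumerate_eq_range ([] : List String) mapa 0, List.flatMap_map]
    refine List.flatMap_congr (fun f _ => ?_)
    simp only [Function.comp_apply]
    rw [enumerate_eq_range "" (mapa.getD f []) 0, List.filterMap_map]
    refine List.filterMap_congr (fun c _ => ?_)
    simp [Function.comp]
  have hbar : (PySem.List.enumerate mapa).foldl (fun s fr =>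
      (PySem.List.enumerate fr.2).foldl (fun s2 cv =>
        if cv.2 = "b" then PySem.Set.add s2 (fr.1 + 1, cv.1 + 1) else s2) s) PySem.Set.empty
      = (List.range mapa.length).flatMap (fun f =>
          (List.range ((mapa.getD f []).length)).filterMap (fun c =>
            if (mapa.getD f []).getD c "" = "b" then some ((f : Int) + 1, (c : Int) + 1) else none)) := by
    simp only [inner_eq]
    rw [← List.foldl_flatMap, hAL]
    have := foldl_add_pairwise ((List.range mapa.length).flatMap (fun f =>
          (List.range ((mapa.getD f []).length)).filterMap (fun c =>
            if (mapa.getD f []).getD c "" = "b" then some ((f : Int) + 1, (c : Int) + 1) else none))) []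
      (by simpa using barcos_pairwise mapa)
    simpa using this
  rw [h1, hbar]
  have hq : ∀ (v : Int × Int),
      ((!(PySem.Set.ofList (pos.map (fun p => (p.1, p.2)))).contains v) = true)
        ↔ (∀ p ∈ pos, ¬ (p = v)) := by
    intro v
    constructor
    · intro h p hp hpv
      have hmem : v ∈ PySem.Set.ofList (pos.map (fun q => (q.1, q.2))) := by
        rw [PySem.Set.mem_ofList]
        exact List.mem_map.mpr ⟨p, hp, hpv⟩
      have hc : (PySem.Set.ofList (pos.map (fun q => (q.1, q.2)))).contains v = true := by
        simpa [PySem.Set.contains] using List.contains_iff_mem.mpr hmem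
      rw [hc] at h
      exact absurd h (by decide)
    · intro h
      cases hcv : (PySem.Set.ofList (pos.map (fun q => (q.1, q.2)))).contains v
      · simp
      · have hmem : v ∈ PySem.Set.ofList (pos.map (fun q => (q.1, q.2))) :=
          List.contains_iff_mem.mp (by simpa [PySem.Set.contains] using hcv)
        rw [PySem.Set.mem_ofList] at hmem
        rcases List.mem_map.mp hmem with ⟨p, hp, hpe⟩
        exact absurd hpe (h p hp)
  have hdiff : PySem.Set.diff
      ((List.range mapa.length).flatMap (fun f =>
          (List.range ((mapa.getD f []).length)).filterMap (fun c =>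
            if (mapa.getD f []).getD c "" = "b" then some ((f : Int) + 1, (c : Int) + 1) else none)))
      (PySem.Set.ofList (pos.map (fun p => (p.1, p.2))))
      = bCells mapa pos := by
    unfold PySem.Set.diff bCells
    rw [List.filter_flatMap]
    refine List.flatMap_congr (fun f hf => ?_)
    rw [List.mem_range] at hf
    have hrowlen : (mapa.getD f []).length = (mapa.headD []).length := by
      have hmem : mapa.getD f [] ∈ mapa := by
        rw [List.getD_eq_getElem?_getD, List.getElem?_eq_getElem hf]
        exact List.getElem_mem hf
      exact guard_rect mapa hg _ hmem
    rw [filter_filterMap_if, hrowlen]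
    refine List.filterMap_congr (fun c _ => ?_)
    refine if_congr (and_congr_right (fun _ => ?_)) rfl rfl
    rw [hq ((f : Int) + 1, (c : Int) + 1)]
    refine forall_congr' (fun p => imp_congr_right (fun _ => not_congr ?_))
    exact Prod.ext_iff
  rw [hdiff]
  refine sorted2_eq_self _ ?_
  rw [← hdiff]
  exact List.Pairwise.sublist List.filter_sublist (barcos_pairwise mapa)

-- ---------- verdict glue ----------

theorem pedro_eq_alt (mapa : List (List String)) (pos : List (Int × Int)) :
    pedro mapa pos = pedro_alt mapa pos := by
  by_cases hg : pedroGuard mapa = true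
  · rw [pedro_char mapa pos hg, pedro_alt_char mapa pos hg]
  · have hg' : pedroGuard mapa = false := by
      cases h : pedroGuard mapa
      · rfl
      · exact absurd h hg
    unfold pedro pedro_alt
    rw [if_neg (by simp [hg']), if_pos (by rw [guard_zip, hg']; rfl)]

-- ===== VERDICT (by name: the statement is the Claim_ definition above) =====
theorem pedro_spec : Claim_equal_pedro := by
  intro mapa pos _
  unfold Spec_pedro
  exact pedro_eq_alt mapa pos
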